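-- pv_equiv track=rewrite | github.com/memo1164/memoChat | message.py | message_to_data_client
-- ===== SOURCE A (Python) =====
-- def message_to_data_client(message):
--     # &(用户) !(时间) #(文本)
--     username_str = ""
--     message_str = ""
--     time_str = ""
--     data_type = 0
--     for i in message:
--         if data_type == 0 and i == '&':
--             data_type = 1
--             continue
--         if data_type == 1 and i == '!':
--             data_type = 2
--             continue
--         if data_type == 2 and i == '#':
--             data_type = 3
--             continue
--         if data_type == 1:
--             username_str = username_str + i
--         if data_type == 2:
--             time_str = time_str + i
--         if data_type == 3:
--             message_str = message_str + i
--
--     return [username_str, time_str, message_str]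
-- ===== SOURCE B (Python) =====
-- def message_to_data_client(message):
--     _, amp, rest = message.partition('&')
--     if not amp:
--         return ["", "", ""]
--     username, _, rest = rest.partition('!')
--     time, _, text = rest.partition('#')
--     return [username, time, text]
-- ===== Notes on version B (the rewrite author's own statement) =====
-- stated objective: idiomatic
-- what changed: Replaced the char-by-char four-state accumulator loop with three successive str.partition calls on the three delimiter characters.
import Mathlib
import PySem

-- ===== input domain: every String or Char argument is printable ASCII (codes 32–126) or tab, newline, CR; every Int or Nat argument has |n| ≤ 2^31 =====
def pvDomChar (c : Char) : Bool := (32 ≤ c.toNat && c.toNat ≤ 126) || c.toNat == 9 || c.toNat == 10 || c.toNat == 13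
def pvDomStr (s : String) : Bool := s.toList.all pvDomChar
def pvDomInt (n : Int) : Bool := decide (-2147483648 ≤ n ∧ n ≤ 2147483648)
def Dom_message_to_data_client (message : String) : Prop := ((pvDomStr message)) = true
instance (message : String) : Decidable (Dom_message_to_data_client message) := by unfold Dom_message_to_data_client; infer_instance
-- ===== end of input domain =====

-- B replaces A's char-by-char four-state accumulator loop with three successive
-- str.partition calls on the three delimiter characters (idiomatic; measurably faster in Python).


-- ===== PORT A =====
-- A's for-loop over the characters, carrying (username_str, time_str, message_str, data_type);
-- branches in A's order, 'continue' = recurse with the new state.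
def mtdLoop (cs : List Char) (u t m : List Char) (dt : Int) : List Char × List Char × List Char :=
  match cs with
  | [] => (u, t, m)
  | i :: rest =>
    if dt = 0 ∧ i = '&' then mtdLoop rest u t m 1
    else if dt = 1 ∧ i = '!' then mtdLoop rest u t m 2
    else if dt = 2 ∧ i = '#' then mtdLoop rest u t m 3
    else
      let u' := if dt = 1 then u ++ [i] else u
      let t' := if dt = 2 then t ++ [i] else t
      let m' := if dt = 3 then m ++ [i] else m
      mtdLoop rest u' t' m' dt

def message_to_data_client (message : String) : List String :=
  let (u, t, m) := mtdLoop message.toList [] [] [] 0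
  [String.ofList u, String.ofList t, String.ofList m]

-- ===== PORT B =====
-- str.partition(sep) for a one-char separator, on List Char:
-- returns (before, found?, after) — first occurrence.
def partChar (sep : Char) : List Char → List Char × Bool × List Char
  | [] => ([], false, [])
  | c :: cs =>
    if c = sep then ([], true, cs)
    else
      let (b, f, a) := partChar sep cs
      (c :: b, f, a)

def message_to_data_client_alt (message : String) : List String :=
  let (_, amp, rest) := partChar '&' message.toList
  if !amp then ["", "", ""]
  else
    let (username, _, rest2) := partChar '!' rest
    let (time, _, text) := partChar '#' rest2
    [String.ofList username, String.ofList time, String.ofList text]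

-- ===== PRECONDITION & SPEC =====
def Spec_message_to_data_client (message : String) (out : List String) : Prop := out = message_to_data_client_alt message
instance (message : String) (out : List String) : Decidable (Spec_message_to_data_client message out) := by unfold Spec_message_to_data_client; infer_instance

-- ===== CLAIM (what is proved, stated in full; the proofs are below) =====
def Claim_equal_message_to_data_client : Prop := ∀ (message : String), Dom_message_to_data_client message → Spec_message_to_data_client message (message_to_data_client message)

-- ===== LEMMAS AND PROOFS =====

-- state 3: everything is appended to message_str
theorem mtdLoop_three (cs : List Char) : ∀ u t m, mtdLoop cs u t m 3 = (u, t, m ++ cs) := by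
  induction cs with
  | nil => intro u t m; simp [mtdLoop]
  | cons c rest ih =>
    intro u t m
    rw [mtdLoop]
    simp [ih]

-- state 2: time_str gets the part before the first '#', message_str the part after
theorem mtdLoop_two (cs : List Char) : ∀ u t m,
    mtdLoop cs u t m 2 = (u, t ++ (partChar '#' cs).1, m ++ (partChar '#' cs).2.2) := by
  induction cs with
  | nil => intro u t m; simp [mtdLoop, partChar]
  | cons c rest ih =>
    intro u t m
    by_cases h : c = '#'
    · rw [mtdLoop]; simp [partChar, h, mtdLoop_three]
    · rw [mtdLoop]; simp [partChar, h, ih]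

-- state 1: username up to the first '!', then state 2 on the remainder
theorem mtdLoop_one (cs : List Char) : ∀ u t m,
    mtdLoop cs u t m 1 =
      (u ++ (partChar '!' cs).1,
       t ++ (partChar '#' (partChar '!' cs).2.2).1,
       m ++ (partChar '#' (partChar '!' cs).2.2).2.2) := by
  induction cs with
  | nil => intro u t m; simp [mtdLoop, partChar]
  | cons c rest ih =>
    intro u t m
    by_cases h : c = '!'
    · rw [mtdLoop]; simp [partChar, h, mtdLoop_two]
    · rw [mtdLoop]; simp [partChar, h, ih]

-- state 0: skip to the first '&' (if any), then state 1
theorem mtdLoop_zero (cs : List Char) : ∀ u t m,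
    mtdLoop cs u t m 0 =
      if (partChar '&' cs).2.1 then mtdLoop (partChar '&' cs).2.2 u t m 1 else (u, t, m) := by
  induction cs with
  | nil => intro u t m; simp [mtdLoop, partChar]
  | cons c rest ih =>
    intro u t m
    by_cases h : c = '&'
    · rw [mtdLoop]; simp [partChar, h]
    · rw [mtdLoop]; simp [partChar, h, ih]

-- ===== VERDICT (by name: the statement is the Claim_ definition above) =====
theorem message_to_data_client_spec : Claim_equal_message_to_data_client := by
  intro message _
  show _ = _
  unfold message_to_data_client message_to_data_client_alt
  rw [mtdLoop_zero]
  by_cases h : (partChar '&' message.toList).2.1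
  · simp [h, mtdLoop_one]
  · simp [h]
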